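-- pv_equiv track=rewrite | github.com/ddib/DSA | Graphs/Basics/is_it_a_tree.py | is_it_a_tree
-- ===== SOURCE A (Python) =====
-- def is_it_a_tree(node_count, edge_start, edge_end):
--     """
--     Problem:
--     Given an undirected graph, find out whether it is a tree.
--     A tree is an undirected connected acyclic graph.
--
--     Input: number of nodes range(n), edges connect nodes edge_start and edge_end
--     Output: boolean
--
--     Complexity:
--     * Time: O(n + m), n: number of vertices. m: number of edges.
--     * Space: O(n + m)
--
--     Note: both BFS and DFS traversals solve this problem.
--     """
--
--     # Build the graph
--     adjList = [[] for _ in range(node_count)]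
--     m = len(edge_start)
--
--     for i in range(m):
--         adjList[edge_start[i]].append(edge_end[i])
--         adjList[edge_end[i]].append(edge_start[i])
--
--     # DFS
--     def DFS(node):
--         for i in adjList[node]:
--             if visited[i] == -1:
--                 visited[i] = node
--                 if not DFS(i):
--                     return False
--             else:
--                 if visited[node] != i:
--                     return False
--         return True
--
--     # Outer loop
--     components = 0
--     visited = [-1] * node_count
--
--     for i in range(node_count):
--         if visited[i] == -1:
--             visited[i] = None
--             components += 1
--             if components > 1:
--                 return False
--             if not DFS(i):
--                 return False
--     return True
-- ===== SOURCE B (Python) =====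
-- def is_it_a_tree(node_count, edge_start, edge_end):
--     # Iterative traversal with an explicit stack instead of recursion, single
--     # start node plus a completeness check instead of a component counter.
--     adjList = [[] for _ in range(node_count)]
--     for i in range(len(edge_start)):
--         u = edge_start[i]
--         v = edge_end[i]
--         adjList[u].append(v)
--         adjList[v].append(u)
--
--     visited = [-1] * node_count
--     if not visited:
--         return True
--
--     visited[0] = None
--     stack = [(0, adjList[0])]
--     while stack:
--         node, rest = stack[-1]
--         if not rest:
--             stack.pop()
--             continue
--         i = rest[0]
--         stack[-1] = (node, rest[1:])
--         if visited[i] == -1: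
--             visited[i] = node
--             stack.append((i, adjList[i]))
--         elif visited[node] != i:
--             return False
--     return -1 not in visited
-- ===== Notes on version B (the rewrite author's own statement) =====
-- stated objective: alternative
-- what changed: A's recursive parent-checking DFS plus an outer component counter is replaced by an iterative traversal that keeps an explicit stack of (node, remaining-neighbours) frames, starts only from node 0, and afterwards checks completeness with '-1 not in visited'; same adjacency-list graph check, but loop-based (no Python recursion) and with a membership test instead of the counter.
import Mathlib
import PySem

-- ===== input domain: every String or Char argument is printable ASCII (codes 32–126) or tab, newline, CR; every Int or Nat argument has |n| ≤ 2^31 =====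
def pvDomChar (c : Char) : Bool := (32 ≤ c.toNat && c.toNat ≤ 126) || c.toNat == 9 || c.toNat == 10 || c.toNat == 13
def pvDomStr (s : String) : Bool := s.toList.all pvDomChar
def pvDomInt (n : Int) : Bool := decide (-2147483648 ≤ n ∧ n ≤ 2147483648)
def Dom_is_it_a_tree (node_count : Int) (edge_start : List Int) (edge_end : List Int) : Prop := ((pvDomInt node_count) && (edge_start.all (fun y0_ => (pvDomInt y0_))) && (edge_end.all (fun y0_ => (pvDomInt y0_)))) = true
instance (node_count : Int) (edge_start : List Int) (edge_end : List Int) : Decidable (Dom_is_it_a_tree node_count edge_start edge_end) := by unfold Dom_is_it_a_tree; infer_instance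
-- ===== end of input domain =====

-- B replaces A's recursive DFS + component counter by an explicit-stack iterative
-- traversal from node 0 followed by a visited-completeness check; return value only
-- (neither version mutates its arguments).

-- ===== PORT A =====
-- visited cells: some (-1) = Python's -1 (unvisited), none = Python's None, some p = parent p.
-- adjList[x].append(y)  (no-op where Python would raise IndexError; excluded by Pre_)
def pvAddEdge (adj : List (List Int)) (x y : Int) : List (List Int) :=
  PySem.List.pySetD adj x ((PySem.List.pyGetD adj x []) ++ [y])

-- the body of A's recursive DFS, `for i in adjList[node]: ...`; `fuel` is a global
-- step budget threaded through the recursion purely as a totality device (each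
-- recursive DFS call consumes one unit; the subtype bound records that fuel never grows)
def pvBodyA (adj : List (List Int)) : (f : Nat) → (node : Int) → (ns : List Int) →
    (vis : List (Option Int)) → {r : Nat × List (Option Int) × Bool // r.1 ≤ f}
  | f, _, [], vis => ⟨(f, vis, true), Nat.le_refl f⟩
  | f, node, i :: ns, vis =>
    if PySem.List.pyGetD vis i none = some (-1) then
      let vis' := PySem.List.pySetD vis i (some node)
      match f with
      | 0 => ⟨(0, vis', false), Nat.le_refl 0⟩
      | g+1 =>
        let r := pvBodyA adj g i (PySem.List.pyGetD adj i []) vis'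
        if r.val.2.2 then
          let r2 := pvBodyA adj r.val.1 node ns r.val.2.1
          ⟨r2.val, Nat.le_succ_of_le (Nat.le_trans r2.prop r.prop)⟩
        else
          ⟨r.val, Nat.le_succ_of_le r.prop⟩
    else if PySem.List.pyGetD vis node none ≠ some i then
      ⟨(f, vis, false), Nat.le_refl f⟩
    else pvBodyA adj f node ns vis
termination_by f _ ns _ => (f, ns.length)
decreasing_by
  · exact Prod.Lex.left _ _ (Nat.lt_succ_self g)
  · exact Prod.Lex.left _ _ (Nat.lt_succ_of_le r.prop)
  · exact Prod.Lex.right _ (Nat.lt_succ_self ns.length)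

-- A's DFS(node) entry point (fuel-out returns False, which only aborts harder)
def pvDfsA (adj : List (List Int)) (f : Nat) (node : Int) (vis : List (Option Int)) :
    Nat × List (Option Int) × Bool :=
  match f with
  | 0 => (0, vis, false)
  | g+1 => (pvBodyA adj g node (PySem.List.pyGetD adj node []) vis).val

-- A's outer loop `for i in range(node_count)` with the `components` counter
def pvOuterA (adj : List (List Int)) (f : Nat) : List Int → Int → List (Option Int) → Bool
  | [], _, _ => true
  | i :: is, comp, vis =>
    if PySem.List.pyGetD vis i none = some (-1) then
      let vis' := PySem.List.pySetD vis i none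
      let comp' := comp + 1
      if comp' > 1 then false
      else
        let r := pvDfsA adj f i vis'
        if r.2.2 then pvOuterA adj f is comp' r.2.1 else false
    else pvOuterA adj f is comp vis

-- generous global step budget (never reached by the Python programs on Pre_ inputs)
def pvFuel (node_count : Int) (edge_start edge_end : List Int) : Nat :=
  node_count.toNat + 8 * edge_start.length + 8 * edge_end.length + 8

def is_it_a_tree (node_count : Int) (edge_start : List Int) (edge_end : List Int) : Bool :=
  let adjList :=
    (PySem.List.pyRange 0 (PySem.List.len edge_start)).foldl
      (fun a i =>
        pvAddEdge (pvAddEdge a (PySem.List.pyGetD edge_start i 0) (PySem.List.pyGetD edge_end i 0))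
          (PySem.List.pyGetD edge_end i 0) (PySem.List.pyGetD edge_start i 0))
      (List.replicate node_count.toNat [])
  let visited := List.replicate node_count.toNat (some (-1) : Option Int)
  pvOuterA adjList (pvFuel node_count edge_start edge_end + 1)
    (PySem.List.pyRange 0 node_count) 0 visited

-- ===== PORT B =====
-- the while-loop over the explicit stack of (node, remaining-neighbours) frames;
-- the same global step budget is consumed exactly where A's port consumes it (one
-- unit per newly pushed frame), again purely as a totality device
def pvRunB (adj : List (List Int)) : (f : Nat) → (stack : List (Int × List Int)) →
    (vis : List (Option Int)) → List (Option Int) × Bool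
  | _, [], vis => (vis, true)
  | f, (_, []) :: rest, vis => pvRunB adj f rest vis
  | f, (node, i :: ns) :: rest, vis =>
    if PySem.List.pyGetD vis i none = some (-1) then
      let vis' := PySem.List.pySetD vis i (some node)
      match f with
      | 0 => (vis', false)
      | g+1 => pvRunB adj g ((i, PySem.List.pyGetD adj i []) :: (node, ns) :: rest) vis'
    else if PySem.List.pyGetD vis node none ≠ some i then (vis, false)
    else pvRunB adj f ((node, ns) :: rest) vis
termination_by f stack _ => (f, (stack.map (fun fr => fr.2.length + 1)).sum)
decreasing_by
  all_goals first
    | exact Prod.Lex.left _ _ (Nat.lt_succ_self g)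
    | exact Prod.Lex.right _ (by simp)

def is_it_a_tree_alt (node_count : Int) (edge_start : List Int) (edge_end : List Int) : Bool :=
  let adjList :=
    (edge_start.zip edge_end).foldl
      (fun a p => pvAddEdge (pvAddEdge a p.1 p.2) p.2 p.1)
      (List.replicate node_count.toNat [])
  let visited := List.replicate node_count.toNat (some (-1) : Option Int)
  if visited.isEmpty then true
  else
    let visited := PySem.List.pySetD visited 0 none
    match pvRunB adjList (pvFuel node_count edge_start edge_end)
        [((0 : Int), PySem.List.pyGetD adjList 0 [])] visited with
    | (vis', true) => !(vis'.contains (some (-1)))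
    | (_, false) => false

-- ===== PRECONDITION & SPEC =====
-- Pre_ excludes exactly the inputs on which Python A raises IndexError: an edge
-- endpoint outside [-node_count, node_count) or edge_end shorter than edge_start.
def Pre_is_it_a_tree (node_count : Int) (edge_start : List Int) (edge_end : List Int) : Prop :=
  edge_start.length ≤ edge_end.length ∧
    ∀ p ∈ edge_start.zip edge_end,
      (-node_count ≤ p.1 ∧ p.1 < node_count) ∧ (-node_count ≤ p.2 ∧ p.2 < node_count)
instance (node_count : Int) (edge_start : List Int) (edge_end : List Int) :
    Decidable (Pre_is_it_a_tree node_count edge_start edge_end) := by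
  unfold Pre_is_it_a_tree; infer_instance

def pvWitness_is_it_a_tree : Int × List Int × List Int := (3, [0, 1], [1, 2])

def Spec_is_it_a_tree (node_count : Int) (edge_start : List Int) (edge_end : List Int) (out : Bool) : Prop := out = is_it_a_tree_alt node_count edge_start edge_end
instance (node_count : Int) (edge_start : List Int) (edge_end : List Int) (out : Bool) : Decidable (Spec_is_it_a_tree node_count edge_start edge_end out) := by unfold Spec_is_it_a_tree; infer_instance

-- ===== CLAIM (what is proved, stated in full; the proofs are below) =====
def Claim_equal_is_it_a_tree : Prop := ∀ (node_count : Int) (edge_start : List Int) (edge_end : List Int), Dom_is_it_a_tree node_count edge_start edge_end → Pre_is_it_a_tree node_count edge_start edge_end → Spec_is_it_a_tree node_count edge_start edge_end (is_it_a_tree node_count edge_start edge_end)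

-- ===== LEMMAS AND PROOFS =====

theorem outerA_one (adj : List (List Int)) (f : Nat) :
    ∀ (is : List Int) (vis : List (Option Int)),
      pvOuterA adj f is 1 vis =
        is.all (fun i => !(PySem.List.pyGetD vis i none == some (-1))) := by
  intro is
  induction is with
  | nil => intro vis; simp [pvOuterA]
  | cons i is ih =>
    intro vis
    rw [pvOuterA]
    by_cases h : PySem.List.pyGetD vis i none = some (-1) <;> simp [h, ih]
theorem runB_eq_bodyA (adj : List (List Int)) :
    ∀ (f : Nat) (ns : List Int) (node : Int) (rest : List (Int × List Int))
      (vis : List (Option Int)),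
      pvRunB adj f ((node, ns) :: rest) vis =
        (if (pvBodyA adj f node ns vis).val.2.2 then
          pvRunB adj (pvBodyA adj f node ns vis).val.1 rest (pvBodyA adj f node ns vis).val.2.1
        else ((pvBodyA adj f node ns vis).val.2.1, false)) := by
  intro f
  induction f using Nat.strong_induction_on with
  | _ f IH =>
    intro ns
    induction ns with
    | nil =>
      intro node rest vis
      rw [pvRunB, pvBodyA]
      simp
    | cons i ns ihns =>
      intro node rest vis
      rw [pvRunB, pvBodyA]
      by_cases h1 : PySem.List.pyGetD vis i none = some (-1)
      · simp only [h1]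
        match f with
        | 0 => simp
        | g+1 =>
          simp only
          rw [IH g (Nat.lt_succ_self g)]
          by_cases hb : (pvBodyA adj g i (PySem.List.pyGetD adj i []) (PySem.List.pySetD vis i (some node))).val.2.2
          · simp only [hb]
            rw [IH (pvBodyA adj g i (PySem.List.pyGetD adj i []) (PySem.List.pySetD vis i (some node))).val.1
                (Nat.lt_succ_of_le (pvBodyA adj g i (PySem.List.pyGetD adj i []) (PySem.List.pySetD vis i (some node))).prop)]
            simp
          · simp [hb]
      · by_cases h2 : PySem.List.pyGetD vis node none = some i
        · simp only [h1, h2, ite_not]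
          rw [ihns]
          simp
        · simp [h1, h2]
theorem pySetD_pres (vis : List (Option Int)) (i : Int) (v : Option Int) (j : Nat)
    (hg : PySem.List.pyGetD vis i none = some (-1)) (hj : vis[j]? ≠ some (some (-1))) :
    (PySem.List.pySetD vis i v)[j]? = vis[j]? := by
  unfold PySem.List.pySetD PySem.List.pySet? PySem.List.pyGetD PySem.List.pyGet? at *
  cases hk : PySem.List.pyIdx? vis.length i with
  | none => simp
  | some k =>
    rw [hk] at hg
    simp only [Option.bind] at hg
    have hvk : vis[k]? = some (some (-1)) := by
      cases hvk : vis[k]? with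
      | none => rw [hvk] at hg; simp at hg
      | some x => rw [hvk] at hg; simp at hg; rw [hg]
    have hne : k ≠ j := by intro h; rw [h] at hvk; exact hj hvk
    simp [List.getElem?_set_ne hne]

theorem bodyA_pres (adj : List (List Int)) :
    ∀ (f : Nat) (ns : List Int) (node : Int) (vis : List (Option Int)),
      (pvBodyA adj f node ns vis).val.2.1.length = vis.length ∧
      ∀ j : Nat, vis[j]? ≠ some (some (-1)) →
        ((pvBodyA adj f node ns vis).val.2.1)[j]? = vis[j]? := by
  intro f
  induction f using Nat.strong_induction_on with
  | _ f IH =>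
    intro ns
    induction ns with
    | nil =>
      intro node vis
      rw [pvBodyA]; exact ⟨rfl, fun j _ => rfl⟩
    | cons i ns ihns =>
      intro node vis
      rw [pvBodyA]
      by_cases h1 : PySem.List.pyGetD vis i none = some (-1)
      · rw [if_pos h1]
        match f with
        | 0 =>
          exact ⟨PySem.List.length_pySetD _ _ _, fun j hj => pySetD_pres vis i _ j h1 hj⟩
        | g+1 =>
          simp only
          obtain ⟨hl1, hp1⟩ :=
            IH g (Nat.lt_succ_self g) (PySem.List.pyGetD adj i []) i
              (PySem.List.pySetD vis i (some node))
          by_cases hb : (pvBodyA adj g i (PySem.List.pyGetD adj i [])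
              (PySem.List.pySetD vis i (some node))).val.2.2 = true
          · simp only [hb, if_true]
            obtain ⟨hl2, hp2⟩ :=
              IH (pvBodyA adj g i (PySem.List.pyGetD adj i [])
                    (PySem.List.pySetD vis i (some node))).val.1
                (Nat.lt_succ_of_le (pvBodyA adj g i (PySem.List.pyGetD adj i [])
                    (PySem.List.pySetD vis i (some node))).prop) ns node
                (pvBodyA adj g i (PySem.List.pyGetD adj i [])
                    (PySem.List.pySetD vis i (some node))).val.2.1
            refine ⟨by rw [hl2, hl1, PySem.List.length_pySetD], fun j hj => ?_⟩
            have e1 := pySetD_pres vis i (some node) j h1 hj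
            have e2 := hp1 j (by rw [e1]; exact hj)
            have e3 := hp2 j (by rw [e2, e1]; exact hj)
            rw [e3, e2, e1]
          · simp only [hb, if_false, Bool.false_eq_true]
            refine ⟨by rw [hl1, PySem.List.length_pySetD], fun j hj => ?_⟩
            have e1 := pySetD_pres vis i (some node) j h1 hj
            have e2 := hp1 j (by rw [e1]; exact hj)
            rw [e2, e1]
      · by_cases h2 : PySem.List.pyGetD vis node none = some i
        · simpa [h1, h2] using ihns node vis
        · simp [h1, h2]
theorem build_eq (es ee : List Int) (h : es.length ≤ ee.length) (init : List (List Int)) :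
    (PySem.List.pyRange 0 (PySem.List.len es)).foldl
      (fun a i =>
        pvAddEdge (pvAddEdge a (PySem.List.pyGetD es i 0) (PySem.List.pyGetD ee i 0))
          (PySem.List.pyGetD ee i 0) (PySem.List.pyGetD es i 0)) init
    = (es.zip ee).foldl (fun a p => pvAddEdge (pvAddEdge a p.1 p.2) p.2 p.1) init := by
  have hz : (es.zip ee).length = es.length := by
    simp [List.length_zip]; omega
  have hlen : PySem.List.len es = PySem.List.len (es.zip ee) := by
    simp [PySem.List.len_eq, hz]
  rw [hlen]
  rw [PySem.List.foldl_congr_mem _ _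
    (fun a i => pvAddEdge (pvAddEdge a (PySem.List.pyGetD (es.zip ee) i (0,0)).1
        (PySem.List.pyGetD (es.zip ee) i (0,0)).2)
      (PySem.List.pyGetD (es.zip ee) i (0,0)).2 (PySem.List.pyGetD (es.zip ee) i (0,0)).1) init ?_]
  · exact PySem.List.foldl_pyRange_zero_pyGetD (es.zip ee) (0,0)
      (fun a p => pvAddEdge (pvAddEdge a p.1 p.2) p.2 p.1) init
  · intro acc i hi
    rw [PySem.List.mem_pyRange_one] at hi
    obtain ⟨h0, h1⟩ := hi
    rw [PySem.List.len_eq] at h1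
    have hes : i.toNat < es.length := by omega
    have hee : i.toNat < ee.length := by omega
    have hzz : i.toNat < (es.zip ee).length := by omega
    beta_reduce
    rw [PySem.List.pyGetD_eq_getElem es 0 h0 (by omega),
        PySem.List.pyGetD_eq_getElem ee 0 h0 (by omega),
        PySem.List.pyGetD_eq_getElem (es.zip ee) (0,0) h0 (by omega)]
    simp [List.getElem_zip]

theorem check_bridge (v : List (Option Int)) (n : Int) (hn : 1 ≤ n) (hl : v.length = n.toNat)
    (h0 : v[0]? = some none) :
    ((PySem.List.pyRange 1 n).all fun i => !(PySem.List.pyGetD v i none == some (-1)))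
      = !(v.contains (some (-1))) := by
  rw [Bool.eq_iff_iff]
  simp only [List.all_eq_true, Bool.not_eq_true', beq_eq_false_iff_ne, ne_eq,
    List.contains_eq_mem, Bool.not_eq_true', decide_eq_false_iff_not]
  constructor
  · intro hall hmem
    obtain ⟨k, hk, hke⟩ := List.mem_iff_getElem.mp hmem
    rcases Nat.eq_zero_or_pos k with hk0 | hkpos
    · subst hk0
      rw [List.getElem?_eq_getElem hk, hke] at h0
      simp at h0
    · have hik : ((k : Int)) ∈ PySem.List.pyRange 1 n := by
        rw [PySem.List.mem_pyRange_one]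
        constructor
        · omega
        · have : k < n.toNat := by omega
          omega
      have := hall _ hik
      rw [PySem.List.pyGetD_eq_getElem v none (by omega) (by omega)] at this
      simp only [Int.toNat_natCast] at this
      exact this hke
  · intro hmem i hi
    rw [PySem.List.mem_pyRange_one] at hi
    rw [PySem.List.pyGetD_eq_getElem v none (by omega) (by rw [hl]; omega)]
    intro hcontra
    exact hmem (hcontra ▸ List.getElem_mem _)
theorem main_eq (n : Int) (es ee : List Int) (hle : es.length ≤ ee.length) :
    is_it_a_tree n es ee = is_it_a_tree_alt n es ee := by
  unfold is_it_a_tree is_it_a_tree_alt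
  simp only
  rw [build_eq es ee hle]
  by_cases hn : n ≤ 0
  · have h0 : n.toNat = 0 := by omega
    rw [PySem.List.pyRange_one_eq_nil hn]
    simp [h0, pvOuterA]
  · have hn1 : (0:Int) < n := by omega
    have hnt : n.toNat ≠ 0 := by omega
    rw [PySem.List.pyRange_one_cons hn1]
    rw [pvOuterA]
    set adjB := List.foldl (fun a p => pvAddEdge (pvAddEdge a p.1 p.2) p.2 p.1)
      (List.replicate n.toNat []) (es.zip ee) with hadj
    set vis0 := List.replicate n.toNat ((some (-1)) : Option Int) with hv0
    set vis1 := PySem.List.pySetD vis0 0 none with hv1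
    obtain ⟨m, hm⟩ : ∃ m, n.toNat = m + 1 := ⟨n.toNat - 1, by omega⟩
    have hg0 : PySem.List.pyGetD vis0 0 none = some (-1) := by
      rw [hv0, hm, List.replicate_succ, PySem.List.pyGetD_zero_cons]
    rw [if_pos hg0]
    have hcomp : ¬((0:Int) + 1 > 1) := by norm_num
    rw [if_neg hcomp]
    have hie : vis0.isEmpty = false := by rw [hv0, hm, List.replicate_succ]; rfl
    rw [hie]
    simp only [Bool.false_eq_true, if_false]
    have hdfs : pvDfsA adjB (pvFuel n es ee + 1) 0 vis1
        = (pvBodyA adjB (pvFuel n es ee) 0 (PySem.List.pyGetD adjB 0 []) vis1).val := rfl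
    rw [hdfs]
    rw [runB_eq_bodyA adjB (pvFuel n es ee) (PySem.List.pyGetD adjB 0 []) 0 [] vis1]
    have hv1len : vis1.length = n.toNat := by
      rw [hv1, PySem.List.length_pySetD, hv0, List.length_replicate]
    have hv10 : vis1[0]? = some none := by
      rw [hv1, PySem.List.pySetD_of_nonneg (i := 0) (v := none) vis0 (by norm_num)]
      simp [hv0, hm]
    obtain ⟨hL, hP⟩ := bodyA_pres adjB (pvFuel n es ee) (PySem.List.pyGetD adjB 0 []) 0 vis1
    have hlv : (pvBodyA adjB (pvFuel n es ee) 0 (PySem.List.pyGetD adjB 0 []) vis1).val.2.1.length = n.toNat :=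
      hL.trans hv1len
    have h0v : (pvBodyA adjB (pvFuel n es ee) 0 (PySem.List.pyGetD adjB 0 []) vis1).val.2.1[0]? = some none :=
      (hP 0 (by rw [hv10]; simp)).trans hv10
    by_cases hb : (pvBodyA adjB (pvFuel n es ee) 0 (PySem.List.pyGetD adjB 0 []) vis1).val.2.2 = true
    · simp only [hb, if_true]
      rw [pvRunB]
      simp only [zero_add]
      rw [outerA_one]
      exact check_bridge _ n (by omega) hlv h0v
    · simp only [hb, if_false, Bool.false_eq_true]

-- ===== VERDICT (by name: the statement is the Claim_ definition above) =====
theorem is_it_a_tree_spec : Claim_equal_is_it_a_tree := by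
  unfold Claim_equal_is_it_a_tree Spec_is_it_a_tree
  intro node_count edge_start edge_end _ hpre
  exact main_eq node_count edge_start edge_end hpre.1
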